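-- pv_equiv track=rewrite | github.com/SherllyNeo/progressive_anagram_gen | progressive_ana.py | split_on_most_frequent_letter
-- ===== SOURCE A (Python) =====
-- def split_on_most_frequent_letter(frequency_dict: dict,list_: list):
--
--     """ this function will use the frequency dict to find the most frequent letter and split a list by it. It will throw an error if all letters are equally frequent, it will choose the second most frequent letter if a split make a list of length None """
--     inverted_dict = {u:v for v,u in frequency_dict.items()}
--     max_key = max(inverted_dict.keys())
--     most_frequent_letter = inverted_dict[max_key]
--     left_list = [choice for choice in list_ if most_frequent_letter not in choice]
--     right_list = [choice for choice in list_ if most_frequent_letter in choice]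
--     while len(left_list) == 0:
--         inverted_dict_keys = list(inverted_dict.keys())
--         inverted_dict_keys.remove(frequency_dict[most_frequent_letter])
--         most_frequent_letter = inverted_dict[max(inverted_dict_keys)]
--         left_list = [choice for choice in list_ if most_frequent_letter not in choice]
--         right_list = [choice for choice in list_ if most_frequent_letter in choice]
--
--     return left_list,right_list,most_frequent_letter
-- ===== SOURCE B (Python) =====
-- def split_on_most_frequent_letter(frequency_dict: dict, list_: list):
--     """Split list_ by the most frequent letter: try candidate letters in
--     descending frequency order (same tie-collapsed inverted dict as the
--     original) and return at the first letter whose left partition is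
--     non-empty."""
--     inverted = {freq: letter for letter, freq in frequency_dict.items()}
--     for freq in sorted(inverted, reverse=True):
--         letter = inverted[freq]
--         left = [w for w in list_ if letter not in w]
--         if left:
--             right = [w for w in list_ if letter in w]
--             return left, right, letter
--     raise ValueError("no candidate letter yields a non-empty left partition")
-- ===== Notes on version B (the rewrite author's own statement) =====
-- stated objective: simpler
-- what changed: A's mutate-and-retry while loop (rebuild the key list, remove the current frequency, re-take max, with state that makes it diverge past the second candidate) is replaced by one for loop over the inverted dict's frequencies sorted descending once, returning at the first candidate letter whose left partition is non-empty.
import Mathlib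
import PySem

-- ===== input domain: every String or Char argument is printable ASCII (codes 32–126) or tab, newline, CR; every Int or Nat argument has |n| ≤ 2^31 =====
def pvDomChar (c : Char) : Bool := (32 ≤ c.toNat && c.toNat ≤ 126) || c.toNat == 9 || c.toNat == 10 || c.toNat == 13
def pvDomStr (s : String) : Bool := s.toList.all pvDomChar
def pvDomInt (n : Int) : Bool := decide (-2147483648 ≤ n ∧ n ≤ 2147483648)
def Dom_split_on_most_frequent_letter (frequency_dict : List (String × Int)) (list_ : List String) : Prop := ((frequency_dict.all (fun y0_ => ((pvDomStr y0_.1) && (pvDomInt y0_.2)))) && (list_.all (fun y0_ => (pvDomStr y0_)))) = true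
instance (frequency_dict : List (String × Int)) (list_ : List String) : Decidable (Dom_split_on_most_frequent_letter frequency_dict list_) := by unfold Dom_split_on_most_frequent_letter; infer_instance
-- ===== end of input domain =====

-- B replaces A's mutate-and-retry while loop by one descending-sorted pass over the
-- candidate frequencies (objective: simpler; equal return value wherever A returns).

-- ===== PORT A =====
-- A's while loop, with a fuel guard only to make it total: under Pre_ the loop body
-- runs at most once, so the fuel is never exhausted on admitted inputs.
def pvA_loop (frequency_dict : PySem.Dict String Int) (inverted_dict : PySem.Dict Int String)
    (list_ : List String) :
    Nat → String → List String → List String → List String × List String × String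
  | 0, mfl, left_list, right_list => (left_list, right_list, mfl)
  | fuel + 1, mfl, left_list, right_list =>
    if left_list.length = 0 then
      let inverted_dict_keys := inverted_dict.keys
      let ks2 := (PySem.List.remove? inverted_dict_keys (frequency_dict.getD mfl 0)).getD []
      let mfl' := (inverted_dict.get? ((PySem.List.max? ks2 (fun x => x)).getD 0)).getD ""
      let left' := list_.filter (fun choice => !(PySem.Str.isIn mfl' choice))
      let right' := list_.filter (fun choice => PySem.Str.isIn mfl' choice)
      pvA_loop frequency_dict inverted_dict list_ fuel mfl' left' right'
    else (left_list, right_list, mfl)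

def split_on_most_frequent_letter (frequency_dict : List (String × Int)) (list_ : List String) :
    List String × List String × String :=
  let d := PySem.Dict.ofList frequency_dict
  let inverted_dict := PySem.Dict.ofList (d.items.map (fun p => (p.2, p.1)))
  let max_key := (PySem.List.max? inverted_dict.keys (fun x => x)).getD 0
  let mfl := (inverted_dict.get? max_key).getD ""
  let left_list := list_.filter (fun choice => !(PySem.Str.isIn mfl choice))
  let right_list := list_.filter (fun choice => PySem.Str.isIn mfl choice)
  pvA_loop d inverted_dict list_ (frequency_dict.length + 2) mfl left_list right_list

-- ===== PORT B =====
-- B's for loop over the descending-sorted candidate frequencies; the [] case is where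
-- the Python B raises ValueError (outside Pre_).
def pvB_go (inverted : PySem.Dict Int String) (list_ : List String) :
    List Int → List String × List String × String
  | [] => ([], [], "")
  | freq :: rest =>
    let letter := (inverted.get? freq).getD ""
    let left := list_.filter (fun w => !(PySem.Str.isIn letter w))
    if left = [] then pvB_go inverted list_ rest
    else (left, list_.filter (fun w => PySem.Str.isIn letter w), letter)

def split_on_most_frequent_letter_alt (frequency_dict : List (String × Int)) (list_ : List String) :
    List String × List String × String :=
  let d := PySem.Dict.ofList frequency_dict
  let inverted := PySem.Dict.ofList (d.items.map (fun p => (p.2, p.1)))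
  pvB_go inverted list_ (PySem.List.sorted inverted.keys (fun x => x) true)

-- ===== PRECONDITION & SPEC =====
-- `some word avoids the letter of candidate frequency k`
def pvCandOk (inverted : PySem.Dict Int String) (list_ : List String) (k : Int) : Bool :=
  list_.any (fun w => !(PySem.Str.isIn ((inverted.get? k).getD "") w))

-- Pre_ excludes exactly the inputs where Python A does not return: the empty
-- frequency_dict and the single-candidate case with an empty left partition
-- (ValueError from max([])), and the inputs where neither of the two highest-frequency
-- candidate letters yields a non-empty left partition (A's while loop then alternates
-- between them forever and diverges).
def Pre_split_on_most_frequent_letter (frequency_dict : List (String × Int)) (list_ : List String) : Prop :=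
  (match PySem.List.sorted (PySem.Dict.ofList ((PySem.Dict.ofList frequency_dict).items.map (fun p => (p.2, p.1)))).keys (fun x => x) true with
    | [] => false
    | [k1] => pvCandOk (PySem.Dict.ofList ((PySem.Dict.ofList frequency_dict).items.map (fun p => (p.2, p.1)))) list_ k1
    | k1 :: k2 :: _ =>
        pvCandOk (PySem.Dict.ofList ((PySem.Dict.ofList frequency_dict).items.map (fun p => (p.2, p.1)))) list_ k1 ||
        pvCandOk (PySem.Dict.ofList ((PySem.Dict.ofList frequency_dict).items.map (fun p => (p.2, p.1)))) list_ k2) = true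

instance (frequency_dict : List (String × Int)) (list_ : List String) : Decidable (Pre_split_on_most_frequent_letter frequency_dict list_) := by unfold Pre_split_on_most_frequent_letter; infer_instance

def pvWitness_split_on_most_frequent_letter : (List (String × Int)) × List String :=
  ([("a", 2), ("b", 1)], ["a", "b"])

def Spec_split_on_most_frequent_letter (frequency_dict : List (String × Int)) (list_ : List String) (out : List String × List String × String) : Prop := out = split_on_most_frequent_letter_alt frequency_dict list_
instance (frequency_dict : List (String × Int)) (list_ : List String) (out : List String × List String × String) : Decidable (Spec_split_on_most_frequent_letter frequency_dict list_ out) := by unfold Spec_split_on_most_frequent_letter; infer_instance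

-- ===== CLAIM (what is proved, stated in full; the proofs are below) =====
def Claim_equal_split_on_most_frequent_letter : Prop := ∀ (frequency_dict : List (String × Int)) (list_ : List String), Dom_split_on_most_frequent_letter frequency_dict list_ → Pre_split_on_most_frequent_letter frequency_dict list_ → Spec_split_on_most_frequent_letter frequency_dict list_ (split_on_most_frequent_letter frequency_dict list_)

-- ===== LEMMAS AND PROOFS =====

-- every item of a dict built by an insert-fold comes from the inserted pairs (or the start)
theorem pv_mem_items_foldl {κ ν : Type} [BEq κ] [LawfulBEq κ] :
    ∀ (ps : List (κ × ν)) (acc : PySem.Dict κ ν) (p : κ × ν),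
      p ∈ (ps.foldl (fun d q => d.insert q.1 q.2) acc).items → p ∈ acc.items ∨ p ∈ ps := by
  intro ps
  induction ps with
  | nil => intro acc p h; exact Or.inl h
  | cons q t ih =>
    intro acc p h
    rcases ih (acc.insert q.1 q.2) p h with h' | h'
    · rcases (PySem.Dict.mem_items_insert _ _ _ _).1 h' with rfl | ⟨hm, _⟩
      · exact Or.inr (List.mem_cons_self)
      · exact Or.inl hm
    · exact Or.inr (List.mem_cons_of_mem _ h')

-- head of the descending sort is the max
theorem pv_max_head (xs : List Int) (k1 : Int) (t : List Int)
    (h : PySem.List.sorted xs (fun x => x) true = k1 :: t) :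
    PySem.List.max? xs (fun x => x) = some k1 := by
  have hk1 : k1 ∈ xs := by
    have := (PySem.List.sorted_perm (xs := xs) (key := fun x => x) (rev := true)).mem_iff (a := k1)
    rw [h] at this
    exact this.1 List.mem_cons_self
  have hne : xs ≠ [] := by intro hx; subst hx; simp at hk1
  rcases hm : PySem.List.max? xs (fun x => x) with _ | m
  · exact absurd ((PySem.List.max?_eq_none_iff _ _).1 hm) hne
  · have hmem : m ∈ xs := PySem.List.max?_mem hm
    have hmax : ∀ y ∈ xs, y ≤ m := PySem.List.max?_isMax hm
    have hdom : ∀ y ∈ xs, y ≤ k1 := PySem.List.key_head_sorted_rev_ge xs (fun x => x) h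
    have : m = k1 := le_antisymm (hdom m hmem) (hmax k1 hk1)
    simp [this]

-- second element of the descending sort is the max of the rest
theorem pv_max_erase (xs : List Int) (k1 k2 : Int) (t : List Int)
    (h : PySem.List.sorted xs (fun x => x) true = k1 :: k2 :: t) :
    PySem.List.max? (xs.erase k1) (fun x => x) = some k2 := by
  have hperm : (k1 :: k2 :: t).Perm xs := PySem.List.sorted_perm (xs := xs) (key := fun x => x) (rev := true) |>.symm.trans (by rw [h]) |>.symm
  have hperm' : ((k1 :: k2 :: t).erase k1).Perm (xs.erase k1) := hperm.erase k1
  have herase : (k1 :: k2 :: t).erase k1 = k2 :: t := by simp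
  rw [herase] at hperm'
  have hk2 : k2 ∈ xs.erase k1 := hperm'.mem_iff.1 List.mem_cons_self
  have hpw : (PySem.List.sorted xs (fun x => x) true).Pairwise (fun a b => b ≤ a) :=
    PySem.List.sorted_pairwise_rev (xs := xs) (key := fun x => x)
  rw [h] at hpw
  have hdom : ∀ y ∈ xs.erase k1, y ≤ k2 := by
    intro y hy
    have hy' : y ∈ k2 :: t := hperm'.mem_iff.2 hy
    rcases List.mem_cons.1 hy' with rfl | hy''
    · exact le_refl _
    · exact (List.pairwise_cons.1 (List.pairwise_cons.1 hpw).2).1 y hy''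
  have hne : xs.erase k1 ≠ [] := by intro hx; rw [hx] at hk2; simp at hk2
  rcases hm : PySem.List.max? (xs.erase k1) (fun x => x) with _ | m
  · exact absurd ((PySem.List.max?_eq_none_iff _ _).1 hm) hne
  · have hmem : m ∈ xs.erase k1 := PySem.List.max?_mem hm
    have hmax : ∀ y ∈ xs.erase k1, y ≤ m := PySem.List.max?_isMax hm
    have : m = k2 := le_antisymm (hdom m hmem) (hmax k2 hk2)
    simp [this]

-- the frequency_dict lookup of the letter picked at frequency k gives back k
theorem pv_lookup_back (fd : List (String × Int)) (k : Int) (L : String)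
    (h : (PySem.Dict.ofList ((PySem.Dict.ofList fd).items.map (fun p => (p.2, p.1)))).get? k = some L) :
    (PySem.Dict.ofList fd).getD L 0 = k := by
  have hmem : (k, L) ∈ (PySem.Dict.ofList ((PySem.Dict.ofList fd).items.map (fun p => (p.2, p.1)))).items :=
    PySem.Dict.mem_items_of_get?_eq_some _ h
  have : (k, L) ∈ PySem.Dict.empty.items ∨ (k, L) ∈ (PySem.Dict.ofList fd).items.map (fun p => (p.2, p.1)) := by
    apply pv_mem_items_foldl
    exact hmem
  rcases this with h' | h'
  · simp [PySem.Dict.empty] at h'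
  · rcases List.mem_map.1 h' with ⟨⟨a, b⟩, hab, hEq⟩
    have ha : a = L := by simpa using congrArg Prod.snd hEq
    have hb : b = k := by simpa using congrArg Prod.fst hEq
    subst ha; subst hb
    exact PySem.Dict.getD_of_mem_items _ hab (PySem.Dict.nodup_keys_ofList fd) 0

-- a key of the inverted dict looks up successfully
theorem pv_get_of_mem_keys {κ ν : Type} [BEq κ] [LawfulBEq κ] (d : PySem.Dict κ ν) (k : κ)
    (h : k ∈ d.keys) : ∃ L, d.get? k = some L := by
  rcases hm : d.get? k with _ | L
  · exact absurd h ((PySem.Dict.get?_eq_none_iff_not_mem_keys _ _).1 hm)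
  · exact ⟨L, rfl⟩

theorem pv_filter_ne_nil_of_any (l : List String) (p : String → Bool)
    (h : l.any p = true) : l.filter p ≠ [] := by
  rcases List.any_eq_true.1 h with ⟨x, hx, hpx⟩
  intro hnil
  have : x ∈ l.filter p := List.mem_filter.2 ⟨hx, hpx⟩
  rw [hnil] at this
  simp at this

-- ===== VERDICT (by name: the statement is the Claim_ definition above) =====
theorem split_on_most_frequent_letter_spec : Claim_equal_split_on_most_frequent_letter := by
  intro fd list_ _ hpre
  unfold Pre_split_on_most_frequent_letter at hpre
  show split_on_most_frequent_letter fd list_ = split_on_most_frequent_letter_alt fd list_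
  simp only [split_on_most_frequent_letter, split_on_most_frequent_letter_alt]
  set d := PySem.Dict.ofList fd with hd
  set inv := PySem.Dict.ofList (d.items.map (fun p => (p.2, p.1))) with hinv
  rcases hdesc : PySem.List.sorted inv.keys (fun x => x) true with _ | ⟨k1, rest⟩
  · rw [hdesc] at hpre; simp at hpre
  · rw [hdesc] at hpre
    have hmax1 : PySem.List.max? inv.keys (fun x => x) = some k1 := pv_max_head _ _ _ hdesc
    have hk1mem : k1 ∈ inv.keys := by
      have := (PySem.List.sorted_perm (xs := inv.keys) (key := fun x => x) (rev := true)).mem_iff (a := k1)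
      rw [hdesc] at this
      exact this.1 List.mem_cons_self
    obtain ⟨L1, hL1⟩ := pv_get_of_mem_keys inv k1 hk1mem
    simp only [hmax1, hL1, Option.getD_some]
    by_cases hleft1 : list_.filter (fun w => !(PySem.Str.isIn L1 w)) = []
    · -- first candidate fails: Pre_ forces a second candidate that succeeds
      rcases hrest : rest with _ | ⟨k2, rest'⟩
      · rw [hrest] at hpre
        exfalso
        have h1 : pvCandOk inv list_ k1 = true := by simpa using hpre
        simp only [pvCandOk, hL1, Option.getD_some] at h1
        exact pv_filter_ne_nil_of_any list_ (fun w => !(PySem.Str.isIn L1 w)) h1 hleft1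
      · rw [hrest] at hpre
        rw [hrest] at hdesc
        have hok2 : pvCandOk inv list_ k2 = true := by
          rcases Bool.or_eq_true_iff.1 (by simpa using hpre) with h1 | h2
          · exfalso
            simp only [pvCandOk, hL1, Option.getD_some] at h1
            exact pv_filter_ne_nil_of_any list_ (fun w => !(PySem.Str.isIn L1 w)) h1 hleft1
          · exact h2
        have hmax2 : PySem.List.max? (inv.keys.erase k1) (fun x => x) = some k2 :=
          pv_max_erase _ _ _ _ hdesc
        have hback : d.getD L1 0 = k1 := pv_lookup_back fd k1 L1 hL1
        have hrem : PySem.List.remove? inv.keys k1 = some (inv.keys.erase k1) :=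
          PySem.List.remove?_eq_some_erase inv.keys k1 hk1mem
        have hk2mem : k2 ∈ inv.keys := by
          have := (PySem.List.sorted_perm (xs := inv.keys) (key := fun x => x) (rev := true)).mem_iff (a := k2)
          rw [hdesc] at this
          exact this.1 (List.mem_cons_of_mem _ List.mem_cons_self)
        obtain ⟨L2, hL2⟩ := pv_get_of_mem_keys inv k2 hk2mem
        have hleft2 : list_.filter (fun w => !(PySem.Str.isIn L2 w)) ≠ [] := by
          simp only [pvCandOk, hL2, Option.getD_some] at hok2
          exact pv_filter_ne_nil_of_any list_ (fun w => !(PySem.Str.isIn L2 w)) hok2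
        -- A: one loop iteration picks k2 and stops; B: skips k1, returns at k2
        rw [show fd.length + 2 = (fd.length + 1) + 1 from rfl, pvA_loop]
        rw [if_pos (by rw [hleft1]; rfl)]
        simp only [hback, hrem, Option.getD_some, hmax2, hL2]
        rw [pvA_loop]
        rw [if_neg (by simpa [List.length_eq_zero_iff] using hleft2)]
        simp only [pvB_go, hL1, Option.getD_some]
        rw [if_pos hleft1]
        simp only [hL2, Option.getD_some]
        rw [if_neg hleft2]
    · -- first candidate succeeds: both return it immediately
      rw [show fd.length + 2 = (fd.length + 1) + 1 from rfl, pvA_loop]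
      rw [if_neg (by simpa [List.length_eq_zero_iff] using hleft1)]
      simp only [pvB_go, hL1, Option.getD_some]
      rw [if_neg hleft1]
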